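-- pv_equiv track=rewrite | github.com/j-vokes/aoc2022 | day5/day5_part1.py | addCargoFromLine
-- ===== SOURCE A (Python) =====
-- def addCargoFromLine(inventory, string, n, start=0):
--   for i, elem in enumerate(string):
--     if(i>=start):
--       if((i-start) % n == 0):
--         if(elem != ' '):
--           # Valid item
--           position = ((i - start) // n) + 1 # 1 index
--           if(position not in inventory):
--             inventory[position] = []
--
--           inventory[position].append(elem)
--
--   return inventory
-- ===== SOURCE B (Python) =====
-- def addCargoFromLine(inventory, string, n, start=0):
--   for position, elem in enumerate(string[start::n], start=1):
--     if elem != ' ':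
--       inventory.setdefault(position, []).append(elem)
--   return inventory
-- ===== Notes on version B (the rewrite author's own statement) =====
-- stated objective: simpler
-- what changed: B replaces A's scan of every character with its i>=start and (i-start)%n guards and floor-division position by a stride slice string[start::n] walked with enumerate(..., start=1) and dict.setdefault, so the loop visits only the crate columns and contains no index arithmetic.
-- outside the precondition, e.g. on addCargoFromLine({}, 'ABC', -1, 0): A returns {1: ['A'], 0: ['B'], -1: ['C']}, B returns {1: ['A']}; on addCargoFromLine({}, 'AB', 1, -3): A returns {4: ['A'], 5: ['B']}, B returns {1: ['A'], 2: ['B']}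
import Mathlib
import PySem

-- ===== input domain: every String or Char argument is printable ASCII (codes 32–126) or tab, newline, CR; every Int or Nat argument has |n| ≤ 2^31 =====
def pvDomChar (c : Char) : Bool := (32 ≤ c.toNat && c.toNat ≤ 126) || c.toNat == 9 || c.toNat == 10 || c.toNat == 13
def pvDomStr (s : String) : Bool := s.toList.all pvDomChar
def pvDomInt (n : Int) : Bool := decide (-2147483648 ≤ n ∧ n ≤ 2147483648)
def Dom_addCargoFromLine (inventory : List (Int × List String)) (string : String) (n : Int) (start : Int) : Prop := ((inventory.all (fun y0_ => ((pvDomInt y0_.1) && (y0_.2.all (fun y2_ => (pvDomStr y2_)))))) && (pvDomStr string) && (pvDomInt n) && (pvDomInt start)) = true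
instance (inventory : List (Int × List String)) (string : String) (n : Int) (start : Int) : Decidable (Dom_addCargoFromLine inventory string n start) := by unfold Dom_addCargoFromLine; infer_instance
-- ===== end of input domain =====

-- B replaces A's full scan of the string (with i>=start and modulo guards and a floor-division
-- position) by a stride slice string[start::n] walked with enumerate(..., start=1) and setdefault;
-- objective: simpler. Python A and B mutate `inventory` in place; the equivalence proved here is
-- about the returned dict (which is the same mutated object in both).


-- ===== PORT A =====
-- loop body of A's `for i, elem in enumerate(string)`
def pvBodyA (n start : Int) (d : PySem.Dict Int (List String)) (p : Int × Char) : PySem.Dict Int (List String) :=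
  if start ≤ p.1 then
    if PySem.Int.mod (p.1 - start) n = 0 then
      if p.2 ≠ ' ' then
        let position : Int := PySem.Int.floordiv (p.1 - start) n + 1
        let d1 := if d.contains position then d else d.insert position ([] : List String)
        d1.modify position [] (fun l => l ++ [String.ofList [p.2]])
      else d
    else d
  else d

def addCargoFromLine (inventory : List (Int × List String)) (string : String) (n : Int) (start : Int) : List (Int × List String) :=
  ((PySem.List.enumerate string.toList 0).foldl (pvBodyA n start) (PySem.Dict.mk inventory)).items

-- ===== PORT B =====
-- loop body of B's `for position, elem in enumerate(string[start::n], start=1)`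
def pvBodyB (d : PySem.Dict Int (List String)) (p : Int × Char) : PySem.Dict Int (List String) :=
  if p.2 ≠ ' ' then d.modify p.1 [] (fun l => l ++ [String.ofList [p.2]]) else d

def addCargoFromLine_alt (inventory : List (Int × List String)) (string : String) (n : Int) (start : Int) : List (Int × List String) :=
  match PySem.Str.slice? string (some start) none n with
  | none => inventory   -- n = 0 only: Python raises ValueError there (outside Pre_)
  | some crates =>
    ((PySem.List.enumerate crates.toList 1).foldl pvBodyB (PySem.Dict.mk inventory)).items

-- ===== PRECONDITION & SPEC =====
-- Pre_ excludes (except when the string is all spaces or empty, where both programs are no-ops)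
-- n ≤ 0 and start < 0, where A still returns on nonzero n: nonpositive column widths and negative
-- start offsets are outside the natural domain of column parsing (A's floor-division positions
-- there are accidental, and B's slice wraps a negative start); n = 0 raises ZeroDivisionError in A
-- as soon as the scan reaches an index ≥ start, and ValueError (slice step 0) in B.
def Pre_addCargoFromLine (inventory : List (Int × List String)) (string : String) (n : Int) (start : Int) : Prop :=
  (1 ≤ n ∧ 0 ≤ start) ∨ (n ≠ 0 ∧ string.toList.all (fun c => c = ' ') = true)
instance (inventory : List (Int × List String)) (string : String) (n : Int) (start : Int) : Decidable (Pre_addCargoFromLine inventory string n start) := by unfold Pre_addCargoFromLine; infer_instance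

def pvWitness_addCargoFromLine : (List (Int × List String)) × String × Int × Int := ([(1, ["Z"])], "[A] [B]", 4, 1)

def Spec_addCargoFromLine (inventory : List (Int × List String)) (string : String) (n : Int) (start : Int) (out : List (Int × List String)) : Prop := out = addCargoFromLine_alt inventory string n start
instance (inventory : List (Int × List String)) (string : String) (n : Int) (start : Int) (out : List (Int × List String)) : Decidable (Spec_addCargoFromLine inventory string n start out) := by unfold Spec_addCargoFromLine; infer_instance

-- ===== CLAIM (what is proved, stated in full; the proofs are below) =====
def Claim_equal_addCargoFromLine : Prop := ∀ (inventory : List (Int × List String)) (string : String) (n : Int) (start : Int), Dom_addCargoFromLine inventory string n start → Pre_addCargoFromLine inventory string n start → Spec_addCargoFromLine inventory string n start (addCargoFromLine inventory string n start)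

-- ===== LEMMAS AND PROOFS =====

-- proof-side normal form of the strided walk: take one char, skip m, repeat (offset s)
def pvStride : List Char → Nat → Nat → List Char
  | [], _, _ => []
  | c :: t, 0, m => c :: pvStride t m m
  | _ :: t, Nat.succ k, m => pvStride t k m

lemma pvStride_eq (m : Nat) : ∀ (cs : List Char) (s : Nat),
    pvStride cs s m = List.filterMap (fun k => cs[(s + (m+1)*k)]?) (List.range cs.length) := by
  intro cs
  induction cs with
  | nil => intro s; simp [pvStride]
  | cons c t ih =>
    intro s
    cases s with
    | zero =>
      rw [show pvStride (c :: t) 0 m = c :: pvStride t m m from rfl]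
      rw [List.length_cons, List.range_succ_eq_map, List.filterMap_cons]
      have h0 : (c :: t)[(0 + (m+1)*0)]? = some c := by simp
      rw [h0, List.filterMap_map]
      congr 1
      rw [ih m]
      apply List.filterMap_congr
      intro k _
      show t[(m + (m+1)*k)]? = (c :: t)[(0 + (m+1)*(k+1))]?
      rw [show 0 + (m+1)*(k+1) = (m + (m+1)*k) + 1 from by ring, List.getElem?_cons_succ]
    | succ s' =>
      rw [show pvStride (c :: t) (s'+1) m = pvStride t s' m from rfl]
      rw [ih s', List.length_cons, List.range_succ, List.filterMap_append]
      have hnone : (c :: t)[((s'+1) + (m+1)*t.length)]? = none := by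
        apply List.getElem?_eq_none
        have h1 : t.length ≤ (m+1) * t.length := Nat.le_mul_of_pos_left _ (Nat.succ_pos m)
        simp only [List.length_cons]
        omega
      rw [show List.filterMap (fun k => (c :: t)[((s'+1) + (m+1)*k)]?) [t.length]
            = [] from by simp [hnone]]
      rw [List.append_nil]
      apply List.filterMap_congr
      intro k _
      show t[(s' + (m+1)*k)]? = (c :: t)[((s'+1) + (m+1)*k)]?
      rw [show (s'+1) + (m+1)*k = (s' + (m+1)*k) + 1 from by ring, List.getElem?_cons_succ]

lemma pvSlice_eq_stride (cs : List Char) (n start : Int) (hn : 1 ≤ n) (hs : 0 ≤ start) :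
    PySem.List.slice? cs (some start) none n = some (pvStride cs start.toNat (n.toNat - 1)) := by
  rw [pvStride_eq (n.toNat - 1) cs start.toNat, show n.toNat - 1 + 1 = n.toNat from by omega]
  have hidx : PySem.List.sliceIndices cs.length (some start) none n
      = (min start (cs.length : Int), (cs.length : Int), n) := by
    simp [PySem.List.sliceIndices, show ¬ n < 0 from by omega, show ¬ start < 0 from by omega]
  unfold PySem.List.slice?
  rw [if_neg (show ¬ n = 0 from by omega), hidx]
  dsimp only
  rw [if_pos (show (0:Int) < n from by omega)]
  by_cases hsl : start < (cs.length : Int)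
  · rw [min_eq_left (le_of_lt hsl), if_pos hsl]
    congr 1
    have hq := Int.ediv_add_emod ((cs.length : Int) - start + n - 1) n
    have hr0 := Int.emod_nonneg ((cs.length : Int) - start + n - 1) (show n ≠ 0 from by omega)
    have hrlt := Int.emod_lt_of_pos ((cs.length : Int) - start + n - 1) (show (0:Int) < n from by omega)
    set q := ((cs.length : Int) - start + n - 1) / n with hqdef
    have hq0 : (0:Int) ≤ q := Int.ediv_nonneg (by omega) (by omega)
    have hmul_ge : (cs.length : Int) - start ≤ n * q := by linarith
    have hq_le : q ≤ (cs.length : Int) := by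
      by_contra h
      push_neg at h
      have h1 : n * ((cs.length : Int) + 1) ≤ n * q :=
        mul_le_mul_of_nonneg_left (by omega) (by omega)
      have h2 : (cs.length : Int) ≤ n * (cs.length : Int) :=
        le_mul_of_one_le_left (by positivity) (by omega)
      have h3 : n * ((cs.length : Int) + 1) = n * (cs.length : Int) + n := by ring
      linarith
    have hcnt_le : q.toNat ≤ cs.length := by omega
    rw [show cs.length = q.toNat + (cs.length - q.toNat) from by omega, List.range_add,
        List.filterMap_append]
    have htail : List.filterMap (fun k => cs[(start.toNat + n.toNat * k)]?)
        ((List.range (cs.length - q.toNat)).map (q.toNat + ·)) = [] := by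
      rw [List.filterMap_map]
      rw [List.filterMap_eq_nil_iff]
      intro x _
      apply List.getElem?_eq_none
      show cs.length ≤ start.toNat + n.toNat * (q.toNat + x)
      have h2 : q ≤ ((q.toNat + x : Nat) : Int) := by push_cast; omega
      have h3 : n * q ≤ n * ((q.toNat + x : Nat) : Int) :=
        mul_le_mul_of_nonneg_left h2 (by omega)
      have hgoal : ((cs.length : Nat) : Int) ≤ ((start.toNat + n.toNat * (q.toNat + x) : Nat) : Int) := by
        push_cast [Int.toNat_of_nonneg hs, Int.toNat_of_nonneg (show (0:Int) ≤ n from by omega)]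
        push_cast at h3
        linarith
      exact_mod_cast hgoal
    rw [htail, List.append_nil]
    apply List.filterMap_congr
    intro x _
    congr 1
    have h1 : (0:Int) ≤ n * (x:Int) := mul_nonneg (by omega) (by positivity)
    have e1 : (((start + n * (x:Int)).toNat : Nat) : Int) = start + n * x :=
      Int.toNat_of_nonneg (by omega)
    have e2 : ((start.toNat + n.toNat * x : Nat) : Int) = start + n * x := by
      push_cast [Int.toNat_of_nonneg hs, Int.toNat_of_nonneg (show (0:Int) ≤ n from by omega)]
      ring
    exact_mod_cast e1.trans e2.symm
  · rw [min_eq_right (by omega), if_neg (lt_irrefl _)]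
    rw [List.range_zero, List.filterMap_nil]
    congr 1
    symm
    rw [List.filterMap_eq_nil_iff]
    intro x _
    apply List.getElem?_eq_none
    have h1 : cs.length ≤ start.toNat := by omega
    exact le_trans h1 (Nat.le_add_right _ _)

lemma pvCollapse (d : PySem.Dict Int (List String)) (pos : Int) (f : List String → List String) :
    PySem.Dict.modify (if d.contains pos then d else d.insert pos ([] : List String)) pos [] f
      = d.modify pos [] f := by
  by_cases h : d.contains pos = true
  · rw [if_pos h]
  · have h' : d.contains pos = false := by simpa using h
    rw [if_neg h, PySem.Dict.modify, PySem.Dict.modify, PySem.Dict.getD_insert_self,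
        PySem.Dict.insert_insert_self, PySem.Dict.getD_of_not_contains (h := h')]

lemma pvMain (n start : Int) (hn : 1 ≤ n) (hs : 0 ≤ start) :
    ∀ (cs : List Char) (j k pos : Int) (d : PySem.Dict Int (List String)),
      0 ≤ j → 0 ≤ k →
      (j < start → k = start - j) → (start ≤ j → k < n) →
      n * (pos - 1) = j + k - start →
      (PySem.List.enumerate cs j).foldl (pvBodyA n start) d
        = (PySem.List.enumerate (pvStride cs k.toNat (n.toNat - 1)) pos).foldl pvBodyB d := by
  intro cs
  induction cs with
  | nil =>
    intro j k pos d _ _ _ _ _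
    simp [pvStride, PySem.List.enumerate_nil]
  | cons c t ih =>
    intro j k pos d hj hk hlt hge hinv
    rw [PySem.List.enumerate_cons, List.foldl_cons]
    by_cases hk0 : k = 0
    · subst hk0
      have hjs : start ≤ j := by
        by_contra h
        have := hlt (by omega)
        omega
      have hdvd : j - start = n * (pos - 1) := by linarith
      rw [show (0:Int).toNat = 0 from rfl,
          show pvStride (c :: t) 0 (n.toNat - 1) = c :: pvStride t (n.toNat - 1) (n.toNat - 1) from rfl,
          PySem.List.enumerate_cons, List.foldl_cons]
      have hbody : pvBodyA n start d (j, c) = pvBodyB d (pos, c) := by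
        unfold pvBodyA pvBodyB
        rw [if_pos hjs,
            if_pos ((PySem.Int.mod_eq_zero_iff_dvd _ _).mpr ⟨pos - 1, hdvd⟩)]
        by_cases hc : c ≠ ' '
        · rw [if_pos hc, if_pos hc]
          have hfd : PySem.Int.floordiv (j - start) n + 1 = pos := by
            have hd : PySem.Int.floordiv (j - start) n = pos - 1 := by
              rw [PySem.Int.floordiv_eq_iff_of_pos (by omega)]
              constructor
              · rw [hdvd]
                exact le_of_eq (mul_comm _ _)
              · rw [hdvd]
                have h3 : (pos - 1 + 1) * n = n * (pos - 1) + n := by ring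
                linarith
            rw [hd]
            ring
          simp only [hfd]
          exact pvCollapse d pos _
        · rw [if_neg hc, if_neg hc]
      rw [hbody]
      have hrec := ih (j+1) (n-1) (pos+1) (pvBodyB d (pos, c)) (by omega) (by omega)
        (by intro h; omega)
        (by intro _; omega)
        (by have h1 : n * (pos + 1 - 1) = n * (pos - 1) + n := by ring
            linarith)
      rw [show (n-1).toNat = n.toNat - 1 from by omega] at hrec
      exact hrec
    · obtain ⟨k', hk'⟩ : ∃ k', k.toNat = k' + 1 := ⟨k.toNat - 1, by omega⟩
      rw [hk', show pvStride (c :: t) (k' + 1) (n.toNat - 1) = pvStride t k' (n.toNat - 1) from rfl]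
      have hbody : pvBodyA n start d (j, c) = d := by
        unfold pvBodyA
        by_cases hjs : start ≤ j
        · have hmod : ¬ PySem.Int.mod (j - start) n = 0 := by
            intro h
            obtain ⟨q, hqq⟩ := (PySem.Int.mod_eq_zero_iff_dvd _ _).mp h
            have hkd : k = n * (pos - 1 - q) := by
              have h4 : n * (pos - 1 - q) = n * (pos - 1) - n * q := by ring
              linarith
            have h5 : n ≤ k := Int.le_of_dvd (by omega) ⟨pos - 1 - q, hkd⟩
            have h6 := hge hjs
            omega
          rw [if_pos hjs, if_neg hmod]
        · rw [if_neg hjs]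
      rw [hbody]
      have hrec := ih (j+1) (k-1) pos d (by omega) (by omega)
        (by intro h
            have := hlt (by omega)
            omega)
        (by intro h
            by_cases hjs : start ≤ j
            · have := hge hjs
              omega
            · have := hlt (by omega)
              omega)
        (by linarith)
      rw [show (k-1).toNat = k' from by omega] at hrec
      exact hrec

-- every element of a slice comes from the sliced list
lemma pvSliceSubset {cs l : List Char} {a b : Option Int} {st : Int}
    (h : PySem.List.slice? cs a b st = some l) : ∀ c ∈ l, c ∈ cs := by
  unfold PySem.List.slice? at h
  by_cases h0 : st = 0
  · rw [if_pos h0] at h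
    exact absurd h (by simp)
  · rw [if_neg h0] at h
    obtain ⟨s, e, st', hmk⟩ : ∃ s e st', PySem.List.sliceIndices cs.length a b st = (s, e, st') :=
      ⟨_, _, _, rfl⟩
    rw [hmk] at h
    dsimp only at h
    injection h with h
    intro c hc
    rw [← h] at hc
    obtain ⟨k, -, hfk⟩ := List.mem_filterMap.mp hc
    exact List.mem_of_getElem? hfk

-- A's loop body ignores a space character
lemma pvBodyA_space (n start : Int) (d : PySem.Dict Int (List String)) (p : Int × Char)
    (hp : p.2 = ' ') : pvBodyA n start d p = d := by
  unfold pvBodyA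
  rw [hp]
  simp

lemma pvBodyB_space (d : PySem.Dict Int (List String)) (p : Int × Char)
    (hp : p.2 = ' ') : pvBodyB d p = d := by
  unfold pvBodyB
  rw [hp]
  simp

-- a fold of either body over an all-space character list is a no-op
lemma pvFold_space {cs : List Char} (hsp : ∀ c ∈ cs, c = ' ') (j : Int)
    (d : PySem.Dict Int (List String))
    (f : PySem.Dict Int (List String) → Int × Char → PySem.Dict Int (List String))
    (hf : ∀ d p, p.2 = ' ' → f d p = d) :
    (PySem.List.enumerate cs j).foldl f d = d := by
  have h : ∀ acc p, p ∈ PySem.List.enumerate cs j → f acc p = (fun acc (_ : Int × Char) => acc) acc p := by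
    intro acc p hp
    obtain ⟨k, hk, rfl⟩ := (PySem.List.mem_enumerate_iff _ _ _).mp hp
    exact hf acc _ (hsp _ (List.getElem_mem hk))
  calc (PySem.List.enumerate cs j).foldl f d
      = (PySem.List.enumerate cs j).foldl (fun acc _ => acc) d := PySem.List.foldl_congr_mem _ _ _ _ h
    _ = d := PySem.List.foldl_ignore _ _

-- ===== VERDICT (by name: the statement is the Claim_ definition above) =====
theorem addCargoFromLine_spec : Claim_equal_addCargoFromLine := by
  intro inventory string n start _hdom hpre
  unfold Spec_addCargoFromLine addCargoFromLine addCargoFromLine_alt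
  rcases hpre with ⟨hn, hs⟩ | ⟨hn0, hsp⟩
  case inr =>
    have hsp' : ∀ c ∈ string.toList, c = ' ' := by simpa using hsp
    rw [pvFold_space hsp' 0 _ _ (pvBodyA_space n start)]
    cases hB : PySem.Str.slice? string (some start) none n with
    | none => rfl
    | some crates =>
      obtain ⟨l, hl, rfl⟩ : ∃ l, PySem.List.slice? string.toList (some start) none n = some l
          ∧ String.ofList l = crates := by
        have : PySem.Str.slice? string (some start) none n
            = Option.map String.ofList (PySem.List.slice? string.toList (some start) none n) := rfl
        rw [this] at hB
        cases h2 : PySem.List.slice? string.toList (some start) none n with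
        | none => rw [h2] at hB; exact absurd hB (by simp)
        | some l => rw [h2] at hB; exact ⟨l, rfl, by simpa using hB⟩
      have hl' : ∀ c ∈ (String.ofList l).toList, c = ' ' := by
        intro c hc
        exact hsp' c (pvSliceSubset hl c (by simpa using hc))
      dsimp only
      rw [pvFold_space hl' 1 _ _ pvBodyB_space]
  case inl =>
  rw [show PySem.Str.slice? string (some start) none n
        = Option.map String.ofList (PySem.List.slice? string.toList (some start) none n) from rfl,
      pvSlice_eq_stride string.toList n start hn hs]
  simp only [Option.map_some]
  rw [show (String.ofList (pvStride string.toList start.toNat (n.toNat - 1))).toList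
        = pvStride string.toList start.toNat (n.toNat - 1) from by simp]
  exact congrArg PySem.Dict.items
    (pvMain n start hn hs string.toList 0 start 1 (PySem.Dict.mk inventory)
      le_rfl hs (by omega) (by omega) (by ring))
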